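-- pv_equiv track=rewrite | github.com/saashqdev/ops-center | backend/storage_manager.py | _determine_volume_type
-- ===== SOURCE A (Python) =====
-- def _determine_volume_type(volume_name: str) -> str:
--     """Determine volume type based on name"""
--     if any(keyword in volume_name.lower() for keyword in ['model', 'embedding', 'whisper', 'kokoro', 'vllm']):
--         return 'AI Models'
--     elif any(keyword in volume_name.lower() for keyword in ['postgres', 'database', 'db']):
--         return 'Database'
--     elif any(keyword in volume_name.lower() for keyword in ['redis', 'cache']):
--         return 'Cache'
--     elif any(keyword in volume_name.lower() for keyword in ['backup', 'archive']):
--         return 'Backup'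
--     else:
--         return 'Data'
-- ===== SOURCE B (Python) =====
-- _KEYWORD_TYPE = {
--     'model': 'AI Models', 'embedding': 'AI Models', 'whisper': 'AI Models',
--     'kokoro': 'AI Models', 'vllm': 'AI Models',
--     'postgres': 'Database', 'database': 'Database', 'db': 'Database',
--     'redis': 'Cache', 'cache': 'Cache',
--     'backup': 'Backup', 'archive': 'Backup',
-- }
-- _PRIORITY = ['AI Models', 'Database', 'Cache', 'Backup']
--
--
-- def _determine_volume_type(volume_name: str) -> str:
--     """Collect every matched type, then pick the highest-priority one."""
--     name = volume_name.lower()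
--     matched = {t for k, t in _KEYWORD_TYPE.items() if k in name}
--     return min(matched, key=_PRIORITY.index, default='Data')
-- ===== Notes on version B (the rewrite author's own statement) =====
-- stated objective: alternative
-- what changed: Inverts the branch structure: a keyword-to-type dict yields the set of ALL matched types in one comprehension, and the answer is selected afterwards as the priority-minimal matched type via min(key=PRIORITY.index) with the catch-all type as the default, replacing A's early-exit if/elif chain that recomputes lower() per branch.
import Mathlib
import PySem

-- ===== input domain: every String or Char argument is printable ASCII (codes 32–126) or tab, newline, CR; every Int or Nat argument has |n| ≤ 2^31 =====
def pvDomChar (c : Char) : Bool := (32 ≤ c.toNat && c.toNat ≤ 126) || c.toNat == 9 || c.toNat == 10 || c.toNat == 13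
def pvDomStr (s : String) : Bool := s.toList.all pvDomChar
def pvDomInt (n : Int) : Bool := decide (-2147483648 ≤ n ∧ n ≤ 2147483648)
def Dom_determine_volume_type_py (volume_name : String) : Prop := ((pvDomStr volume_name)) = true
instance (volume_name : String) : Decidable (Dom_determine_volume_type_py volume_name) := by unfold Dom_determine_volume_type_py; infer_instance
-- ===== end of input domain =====

-- B inverts A's if/elif chain: a keyword->type dict gives the set of all matched types, then the priority-minimal one is selected with min(key=PRIORITY.index) (alternative decomposition; same cost).


-- ===== PORT A =====
def determine_volume_type_py (volume_name : String) : String :=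
  if ["model", "embedding", "whisper", "kokoro", "vllm"].any
      (fun keyword => PySem.Str.isIn keyword (PySem.Str.lower volume_name)) then "AI Models"
  else if ["postgres", "database", "db"].any
      (fun keyword => PySem.Str.isIn keyword (PySem.Str.lower volume_name)) then "Database"
  else if ["redis", "cache"].any
      (fun keyword => PySem.Str.isIn keyword (PySem.Str.lower volume_name)) then "Cache"
  else if ["backup", "archive"].any
      (fun keyword => PySem.Str.isIn keyword (PySem.Str.lower volume_name)) then "Backup"
  else "Data"

-- ===== PORT B =====
-- B's module constants: _KEYWORD_TYPE (a dict, as an insertion-ordered association list) and _PRIORITY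
def pvKeywordType : List (String × String) :=
  [("model", "AI Models"), ("embedding", "AI Models"), ("whisper", "AI Models"),
   ("kokoro", "AI Models"), ("vllm", "AI Models"),
   ("postgres", "Database"), ("database", "Database"), ("db", "Database"),
   ("redis", "Cache"), ("cache", "Cache"),
   ("backup", "Backup"), ("archive", "Backup")]

def pvPriority : List String := ["AI Models", "Database", "Cache", "Backup"]

-- _PRIORITY.index as a total key: every value of _KEYWORD_TYPE occurs in _PRIORITY, so the
-- ValueError branch of list.index (the `none` of index?) is unreachable; getD 0 totalises it.
def pvPriorityIndex (t : String) : Nat := (PySem.List.index? pvPriority t).getD 0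

def determine_volume_type_py_alt (volume_name : String) : String :=
  let name := PySem.Str.lower volume_name
  let matched : PySem.Set String :=
    PySem.Set.ofList ((pvKeywordType.filter (fun kt => PySem.Str.isIn kt.1 name)).map Prod.snd)
  PySem.List.minD matched pvPriorityIndex "Data"

-- ===== PRECONDITION & SPEC =====
def Spec_determine_volume_type_py (volume_name : String) (out : String) : Prop := out = determine_volume_type_py_alt volume_name
instance (volume_name : String) (out : String) : Decidable (Spec_determine_volume_type_py volume_name out) := by unfold Spec_determine_volume_type_py; infer_instance

-- ===== CLAIM (what is proved, stated in full; the proofs are below) =====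
def Claim_equal_determine_volume_type_py : Prop := ∀ (volume_name : String), Dom_determine_volume_type_py volume_name → Spec_determine_volume_type_py volume_name (determine_volume_type_py volume_name)

-- ===== LEMMAS AND PROOFS =====

-- ===== VERDICT (by name: the statement is the Claim_ definition above) =====
-- Both ports as a function of the twelve keyword-containment booleans.
-- pvPred b1..b12 is the B-side filter predicate with each keyword's containment test abstracted.
def pvPred (b1 b2 b3 b4 b5 b6 b7 b8 b9 b10 b11 b12 : Bool) (kt : String × String) : Bool :=
  if kt.1 = "model" then b1 else if kt.1 = "embedding" then b2 else if kt.1 = "whisper" then b3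
  else if kt.1 = "kokoro" then b4 else if kt.1 = "vllm" then b5 else if kt.1 = "postgres" then b6
  else if kt.1 = "database" then b7 else if kt.1 = "db" then b8 else if kt.1 = "redis" then b9
  else if kt.1 = "cache" then b10 else if kt.1 = "backup" then b11 else if kt.1 = "archive" then b12
  else false

set_option maxHeartbeats 1000000 in
theorem pvHelper (b1 b2 b3 b4 b5 b6 b7 b8 b9 b10 b11 b12 : Bool) :
    (if (b1 || (b2 || (b3 || (b4 || (b5 || false))))) = true then "AI Models"
     else if (b6 || (b7 || (b8 || false))) = true then "Database"
     else if (b9 || (b10 || false)) = true then "Cache"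
     else if (b11 || (b12 || false)) = true then "Backup"
     else "Data")
    = PySem.List.minD
        (PySem.Set.ofList
          ((pvKeywordType.filter (pvPred b1 b2 b3 b4 b5 b6 b7 b8 b9 b10 b11 b12)).map Prod.snd))
        pvPriorityIndex "Data" := by
  revert b1 b2 b3 b4 b5 b6 b7 b8 b9 b10 b11 b12
  decide

set_option maxHeartbeats 1000000 in
theorem determine_volume_type_py_spec : Claim_equal_determine_volume_type_py := by
  intro volume_name _
  unfold Spec_determine_volume_type_py determine_volume_type_py determine_volume_type_py_alt
  simp only [List.any_cons, List.any_nil]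
  rw [List.filter_congr (l := pvKeywordType)
        (p := fun kt => PySem.Str.isIn kt.1 (PySem.Str.lower volume_name))
        (q := pvPred (PySem.Str.isIn "model" (PySem.Str.lower volume_name))
          (PySem.Str.isIn "embedding" (PySem.Str.lower volume_name))
          (PySem.Str.isIn "whisper" (PySem.Str.lower volume_name))
          (PySem.Str.isIn "kokoro" (PySem.Str.lower volume_name))
          (PySem.Str.isIn "vllm" (PySem.Str.lower volume_name))
          (PySem.Str.isIn "postgres" (PySem.Str.lower volume_name))
          (PySem.Str.isIn "database" (PySem.Str.lower volume_name))
          (PySem.Str.isIn "db" (PySem.Str.lower volume_name))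
          (PySem.Str.isIn "redis" (PySem.Str.lower volume_name))
          (PySem.Str.isIn "cache" (PySem.Str.lower volume_name))
          (PySem.Str.isIn "backup" (PySem.Str.lower volume_name))
          (PySem.Str.isIn "archive" (PySem.Str.lower volume_name)))
        (by intro x hx; fin_cases hx <;> simp [pvPred])]
  exact pvHelper _ _ _ _ _ _ _ _ _ _ _ _
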